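-- pv_equiv track=rewrite | github.com/zEleceed/Finishing-MOOC-Course | part11-13_add_numbers_to_list/src/add_numbers_to_list.py | add_numbers_to_list
-- ===== SOURCE A (Python) =====
-- def add_numbers_to_list(numbers: list):
--     x = len(numbers)
--     if x % 5 == 0:
--         return numbers
--     else:
--         maxnumber = max(numbers)
--         maxnumber += 1
--         numbers.append(maxnumber)
--         return add_numbers_to_list(numbers)
-- ===== SOURCE B (Python) =====
-- def add_numbers_to_list(numbers: list):
--     k = -len(numbers) % 5
--     if k:
--         m = max(numbers)
--         numbers.extend(range(m + 1, m + k + 1))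
--     return numbers
-- ===== Notes on version B (the rewrite author's own statement) =====
-- stated objective: simpler
-- what changed: Replaces A's recursion that re-computes max and appends one element per call with a non-recursive closed form: compute the shortfall k = -len % 5 once, take max once, and extend the list with range(max+1, max+k+1) in a single step.
import Mathlib
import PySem

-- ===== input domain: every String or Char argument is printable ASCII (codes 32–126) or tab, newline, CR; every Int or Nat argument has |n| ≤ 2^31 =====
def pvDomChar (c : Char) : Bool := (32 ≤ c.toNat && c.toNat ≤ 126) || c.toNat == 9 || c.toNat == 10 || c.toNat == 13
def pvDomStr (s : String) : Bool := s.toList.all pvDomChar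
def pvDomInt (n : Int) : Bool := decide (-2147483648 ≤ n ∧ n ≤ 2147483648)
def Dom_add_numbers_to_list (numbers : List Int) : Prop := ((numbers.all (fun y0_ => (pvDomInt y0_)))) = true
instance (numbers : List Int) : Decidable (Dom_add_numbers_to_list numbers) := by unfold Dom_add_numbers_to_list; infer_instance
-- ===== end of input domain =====

-- B replaces A's recursive append-one-at-a-time with a single closed-form extend:
-- it computes the shortfall k = (-len) % 5, takes max once, and appends m+1..m+k in one step (simpler, max computed once).


-- ===== PORT A =====
-- literal port of A: recursion appending max+1 until length % 5 == 0
-- (A mutates its argument in place; the equivalence here is about the return value)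
def add_numbers_to_list (numbers : List Int) : List Int :=
  if numbers.length % 5 == 0 then numbers
  else
    match PySem.List.max? numbers (fun y => y) with
    | none => numbers   -- unreachable totality guard: length % 5 ≠ 0 forces numbers ≠ []
    | some m => add_numbers_to_list (numbers ++ [m + 1])
termination_by (5 - numbers.length % 5) % 5
decreasing_by simp_all; omega

-- ===== PORT B =====
-- literal port of Source B: k = -len % 5; if k: extend(range(max+1, max+k+1))
def add_numbers_to_list_alt (numbers : List Int) : List Int :=
  let k : Int := PySem.Int.mod (-(numbers.length : Int)) 5
  if k == 0 then numbers
  else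
    match PySem.List.max? numbers (fun y => y) with
    | none => numbers   -- unreachable totality guard: k ≠ 0 forces numbers ≠ []
    | some m => numbers ++ PySem.List.pyRange (m + 1) (m + k + 1) 1

-- ===== PRECONDITION & SPEC =====
def Spec_add_numbers_to_list (numbers : List Int) (out : List Int) : Prop := out = add_numbers_to_list_alt numbers
instance (numbers : List Int) (out : List Int) : Decidable (Spec_add_numbers_to_list numbers out) := by unfold Spec_add_numbers_to_list; infer_instance

-- ===== CLAIM (what is proved, stated in full; the proofs are below) =====
def Claim_equal_add_numbers_to_list : Prop := ∀ (numbers : List Int), Dom_add_numbers_to_list numbers → Spec_add_numbers_to_list numbers (add_numbers_to_list numbers)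

-- ===== LEMMAS AND PROOFS =====

-- A in closed form: starting from a list with max m and shortfall k, A appends m+1..m+k
lemma add_numbers_closed (k : Nat) : ∀ (numbers : List Int) (m : Int),
    PySem.List.max? numbers (fun y => y) = some m →
    k = (5 - numbers.length % 5) % 5 →
    add_numbers_to_list numbers = numbers ++ PySem.List.pyRange (m + 1) (m + 1 + k) 1 := by
  induction k with
  | zero =>
    intro numbers m hmax hk
    have hlen : numbers.length % 5 = 0 := by omega
    rw [add_numbers_to_list]
    simp [hlen]
  | succ k ih =>
    intro numbers m hmax hk
    obtain ⟨x, t, rfl⟩ : ∃ x t, numbers = x :: t := by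
      cases numbers with
      | nil =>
        rw [(PySem.List.max?_eq_none_iff _ _).mpr rfl] at hmax; cases hmax
      | cons x t => exact ⟨x, t, rfl⟩
    simp only [List.length_cons] at hk
    have hlen : (t.length + 1) % 5 ≠ 0 := by omega
    rw [add_numbers_to_list]
    simp only [List.length_cons, hmax]
    have hne : ((t.length + 1) % 5 == 0) = false := by simp [hlen]
    rw [hne]
    simp only [Bool.false_eq_true, if_false]
    have hm : t.foldl max x = m := by
      rw [PySem.List.max?_id_cons] at hmax; exact Option.some.inj hmax
    have hmax' : PySem.List.max? ((x :: t) ++ [m + 1]) (fun y => y) = some (m + 1) := by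
      rw [List.cons_append, PySem.List.max?_id_cons, List.foldl_append, hm]
      simp
    have hk' : k = (5 - ((x :: t) ++ [m + 1]).length % 5) % 5 := by
      simp only [List.length_append, List.length_cons, List.length_nil]
      omega
    rw [ih _ _ hmax' hk']
    rw [List.append_assoc]
    congr 1
    push_cast
    have hb : m + 1 + ((k:Int) + 1) = m + 1 + 1 + (k:Int) := by ring
    rw [hb, PySem.List.pyRange_one_cons (by omega : m + 1 < m + 1 + 1 + (k:Int))]
    simp

lemma mod_neg_len (L : Nat) :
    PySem.Int.mod (-(L : Int)) 5 = (((5 - L % 5) % 5 : Nat) : Int) := by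
  rw [PySem.Int.mod_eq_emod_of_pos]
  · omega
  · norm_num

theorem add_numbers_to_list_spec_aux (numbers : List Int) :
    add_numbers_to_list numbers = add_numbers_to_list_alt numbers := by
  simp only [add_numbers_to_list_alt, mod_neg_len]
  by_cases h : numbers.length % 5 = 0
  · have h0 : ((5 - numbers.length % 5) % 5 : Nat) = 0 := by omega
    rw [h0]
    simp only [Int.natCast_zero, beq_self_eq_true, if_true]
    rw [add_numbers_to_list]
    simp [h]
  · obtain ⟨x, t, rfl⟩ : ∃ x t, numbers = x :: t := by
      cases numbers with
      | nil => simp at h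
      | cons x t => exact ⟨x, t, rfl⟩
    simp only [List.length_cons] at h ⊢
    have hk : ((5 - (t.length + 1) % 5) % 5 : Nat) ≠ 0 := by omega
    have hne : ((((5 - (t.length + 1) % 5) % 5 : Nat) : Int) == 0) = false := by
      simp; omega
    rw [hne]
    simp only [Bool.false_eq_true, if_false, PySem.List.max?_id_cons]
    rw [add_numbers_closed ((5 - (t.length + 1) % 5) % 5) (x :: t) (t.foldl max x)
        (PySem.List.max?_id_cons x t) (by simp only [List.length_cons])]
    congr 2
    ring

-- ===== VERDICT (by name: the statement is the Claim_ definition above) =====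
theorem add_numbers_to_list_spec : Claim_equal_add_numbers_to_list := by
  intro numbers _
  exact add_numbers_to_list_spec_aux numbers
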